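-- pv_equiv track=rewrite | github.com/Leshauts/Milo | backend/infrastructure/services/snapcast_service.py | _modify_config_content
-- ===== SOURCE A (Python) =====
-- from typing import List, Dict, Any, Optional
--
-- def _modify_config_content(content: str, config: Dict[str, Any]) -> str:
--     """Modifie le contenu du fichier avec les nouveaux paramètres"""
--     lines = content.split('\n')
--     updated_lines = []
--     in_stream_section = False
--
--     for line in lines:
--         original_line = line
--         stripped_line = line.strip()
--
--         # Détecter la section [stream]
--         if stripped_line == "[stream]":
--             in_stream_section = True
--             updated_lines.append(original_line)
--             continue
--         elif stripped_line.startswith("[") and stripped_line != "[stream]":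
--             in_stream_section = False
--
--         # Modifier les paramètres dans la section [stream]
--         if in_stream_section and "=" in stripped_line and not stripped_line.startswith("#"):
--             key = stripped_line.split("=")[0].strip()
--
--             if key == "buffer" and "buffer" in config:
--                 updated_lines.append(f"buffer = {config['buffer']}")
--             elif key == "codec" and "codec" in config:
--                 updated_lines.append(f"codec = {config['codec']}")
--             elif key == "chunk_ms" and "chunk_ms" in config:
--                 updated_lines.append(f"chunk_ms = {config['chunk_ms']}")
--             elif key == "sampleformat":
--                 # Toujours forcer sampleformat à 48000:16:2
--                 updated_lines.append(f"sampleformat = 48000:16:2")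
--             else:
--                 # Garder la ligne originale pour les autres paramètres
--                 updated_lines.append(original_line)
--         else:
--             # Garder toutes les autres lignes inchangées
--             updated_lines.append(original_line)
--
--     return '\n'.join(updated_lines)
-- ===== SOURCE B (Python) =====
-- def _rewrite_stream_line(line, config):
--     stripped = line.strip()
--     if "=" not in stripped or stripped.startswith("#"):
--         return line
--     key = stripped.split("=")[0].strip()
--     if key == "buffer" and "buffer" in config:
--         return f"buffer = {config['buffer']}"
--     if key == "codec" and "codec" in config:
--         return f"codec = {config['codec']}"
--     if key == "chunk_ms" and "chunk_ms" in config: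
--         return f"chunk_ms = {config['chunk_ms']}"
--     if key == "sampleformat":
--         return "sampleformat = 48000:16:2"
--     return line
--
--
-- def _modify_config_content(content, config):
--     # Parse into section chunks, rewrite the [stream] chunks, flatten back.
--     chunks = []
--     cur = []
--     for line in content.split('\n'):
--         if line.strip().startswith('['):
--             chunks.append(cur)
--             cur = [line]
--         else:
--             cur.append(line)
--     chunks.append(cur)
--
--     out = []
--     for chunk in chunks:
--         if chunk and chunk[0].strip() == '[stream]':
--             out.append(chunk[0])
--             out.extend(_rewrite_stream_line(l, config) for l in chunk[1:])
--         else: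
--             out.extend(chunk)
--     return '\n'.join(out)
-- ===== Notes on version B (the rewrite author's own statement) =====
-- stated objective: alternative
-- what changed: Replaces the single-pass in_stream_section boolean state machine with an explicit parse-then-transform decomposition: lines are first grouped into section chunks at '['-headers, then each [stream] chunk's body is mapped through a line-rewrite helper and the chunks are flattened back.
import Mathlib
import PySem

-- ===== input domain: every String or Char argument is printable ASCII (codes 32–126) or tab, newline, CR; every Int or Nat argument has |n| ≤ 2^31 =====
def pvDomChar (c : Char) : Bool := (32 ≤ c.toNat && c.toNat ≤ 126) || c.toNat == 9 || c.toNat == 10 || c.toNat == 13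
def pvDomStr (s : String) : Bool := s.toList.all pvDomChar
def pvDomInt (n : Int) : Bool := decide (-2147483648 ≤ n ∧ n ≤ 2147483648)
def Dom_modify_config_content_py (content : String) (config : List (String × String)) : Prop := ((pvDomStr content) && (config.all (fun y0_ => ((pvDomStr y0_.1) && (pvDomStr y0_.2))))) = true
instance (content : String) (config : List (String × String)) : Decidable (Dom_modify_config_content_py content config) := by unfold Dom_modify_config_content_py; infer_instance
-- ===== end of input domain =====

-- B rewrites the [stream] rewriting as parse-into-section-chunks, map over stream chunks, flatten; same return value as A.

-- ===== PORT A =====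
-- the for-loop of A, carrying (remaining lines, in_stream_section); output list built front-to-back
def pvLoopA (config : List (String × String)) : List String → Bool → List String
  | [], _ => []
  | line :: rest, in_stream =>
    let stripped := PySem.Str.strip line
    if stripped == "[stream]" then
      line :: pvLoopA config rest true
    else
      let in_stream' := if PySem.Str.startswith stripped "[" then false else in_stream
      if in_stream' && PySem.Str.isIn "=" stripped && !PySem.Str.startswith stripped "#" then
        (let key := PySem.Str.strip (((PySem.Str.split? stripped "=").getD []).headD "");
          -- stripped.split("=")[0]: split with nonempty sep is never empty, so [0] = headD ""
         if key == "buffer" && (PySem.Dict.get? (PySem.Dict.mk config) "buffer").isSome then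
           "buffer = " ++ (PySem.Dict.get? (PySem.Dict.mk config) "buffer").getD ""
         else if key == "codec" && (PySem.Dict.get? (PySem.Dict.mk config) "codec").isSome then
           "codec = " ++ (PySem.Dict.get? (PySem.Dict.mk config) "codec").getD ""
         else if key == "chunk_ms" && (PySem.Dict.get? (PySem.Dict.mk config) "chunk_ms").isSome then
           "chunk_ms = " ++ (PySem.Dict.get? (PySem.Dict.mk config) "chunk_ms").getD ""
         else if key == "sampleformat" then
           "sampleformat = 48000:16:2"
         else line) :: pvLoopA config rest in_stream'
      else
        line :: pvLoopA config rest in_stream'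

def modify_config_content_py (content : String) (config : List (String × String)) : String :=
  PySem.Str.join "\n" (pvLoopA config ((PySem.Str.split? content "\n").getD []) false)

-- ===== PORT B =====
-- _rewrite_stream_line
def pvRewriteLine (config : List (String × String)) (line : String) : String :=
  let stripped := PySem.Str.strip line
  if !PySem.Str.isIn "=" stripped || PySem.Str.startswith stripped "#" then line
  else
    let key := PySem.Str.strip (((PySem.Str.split? stripped "=").getD []).headD "")
    if key == "buffer" && (PySem.Dict.get? (PySem.Dict.mk config) "buffer").isSome then
      "buffer = " ++ (PySem.Dict.get? (PySem.Dict.mk config) "buffer").getD ""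
    else if key == "codec" && (PySem.Dict.get? (PySem.Dict.mk config) "codec").isSome then
      "codec = " ++ (PySem.Dict.get? (PySem.Dict.mk config) "codec").getD ""
    else if key == "chunk_ms" && (PySem.Dict.get? (PySem.Dict.mk config) "chunk_ms").isSome then
      "chunk_ms = " ++ (PySem.Dict.get? (PySem.Dict.mk config) "chunk_ms").getD ""
    else if key == "sampleformat" then
      "sampleformat = 48000:16:2"
    else line

-- the chunking loop: group lines into section chunks at lines whose strip starts with '['
def pvChunk : List String → List String → List (List String)
  | [], cur => [cur]
  | l :: ls, cur =>
    if PySem.Str.startswith (PySem.Str.strip l) "[" then cur :: pvChunk ls [l]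
    else pvChunk ls (cur ++ [l])

-- the per-chunk pass: rewrite the body of a [stream] chunk, keep other chunks verbatim
def pvProcChunk (config : List (String × String)) : List String → List String
  | [] => []
  | h :: t => if PySem.Str.strip h == "[stream]" then h :: t.map (pvRewriteLine config) else h :: t

def modify_config_content_py_alt (content : String) (config : List (String × String)) : String :=
  PySem.Str.join "\n"
    (((pvChunk ((PySem.Str.split? content "\n").getD []) []).map (pvProcChunk config)).flatten)

-- ===== PRECONDITION & SPEC =====
def Spec_modify_config_content_py (content : String) (config : List (String × String)) (out : String) : Prop := out = modify_config_content_py_alt content config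
instance (content : String) (config : List (String × String)) (out : String) : Decidable (Spec_modify_config_content_py content config out) := by unfold Spec_modify_config_content_py; infer_instance

-- ===== CLAIM (what is proved, stated in full; the proofs are below) =====
def Claim_equal_modify_config_content_py : Prop := ∀ (content : String) (config : List (String × String)), Dom_modify_config_content_py content config → Spec_modify_config_content_py content config (modify_config_content_py content config)

-- ===== LEMMAS AND PROOFS =====

-- the in_stream flag A would carry at the point where B's accumulated chunk is `cur`
def pvStreamHead : List String → Bool
  | [] => false
  | h :: _ => PySem.Str.strip h == "[stream]"

lemma pvProcChunk_singleton (config : List (String × String)) (l : String) :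
    pvProcChunk config [l] = [l] := by
  simp only [pvProcChunk]
  split <;> simp

lemma pvStream_startswith (l : String) (h : (PySem.Str.strip l == "[stream]") = true) :
    PySem.Str.startswith (PySem.Str.strip l) "[" = true := by
  rw [eq_of_beq h]; decide

-- A's step on a "[stream]" header line
lemma pvLoopA_step_hdr (config : List (String × String)) (l : String) (rest : List String)
    (b : Bool) (hs : (PySem.Str.strip l == "[stream]") = true) :
    pvLoopA config (l :: rest) b = l :: pvLoopA config rest true := by
  simp only [pvLoopA]
  rw [hs]
  simp

-- A's step on any other header line, or on an ordinary line outside the stream section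
lemma pvLoopA_step_off (config : List (String × String)) (l : String) (rest : List String)
    (b : Bool) (hs : (PySem.Str.strip l == "[stream]") = false)
    (hoff : (if PySem.Str.startswith (PySem.Str.strip l) "[" = true then false else b) = false) :
    pvLoopA config (l :: rest) b = l :: pvLoopA config rest false := by
  simp only [pvLoopA]
  rw [hs, hoff]
  simp

-- A's in-stream step appends exactly what B's _rewrite_stream_line returns
lemma pvLoopA_step_stream (config : List (String × String)) (l : String) (rest : List String)
    (hs : (PySem.Str.strip l == "[stream]") = false)
    (hdr : PySem.Str.startswith (PySem.Str.strip l) "[" = false) :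
    pvLoopA config (l :: rest) true = pvRewriteLine config l :: pvLoopA config rest true := by
  simp only [pvLoopA, pvRewriteLine]
  rw [hs, hdr]
  cases hin : PySem.Str.isIn "=" (PySem.Str.strip l) <;>
    cases hpd : PySem.Str.startswith (PySem.Str.strip l) "#" <;>
      simp

theorem pvMain (config : List (String × String)) :
    ∀ (ls cur : List String),
      ((pvChunk ls cur).map (pvProcChunk config)).flatten
        = pvProcChunk config cur ++ pvLoopA config ls (pvStreamHead cur) := by
  intro ls
  induction ls with
  | nil => intro cur; simp [pvChunk, pvLoopA]
  | cons l ls ih =>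
    intro cur
    cases hdr : PySem.Str.startswith (PySem.Str.strip l) "[" with
    | true =>
      -- header line: close the current chunk, open a new one
      have hchunk : pvChunk (l :: ls) cur = cur :: pvChunk ls [l] := by
        simp only [pvChunk]; rw [hdr]; simp
      rw [hchunk, List.map_cons, List.flatten_cons, ih [l], pvProcChunk_singleton]
      cases hs : (PySem.Str.strip l == "[stream]") with
      | true =>
        rw [pvLoopA_step_hdr config l ls (pvStreamHead cur) hs]
        show _ ++ ([l] ++ pvLoopA config ls (pvStreamHead [l])) = _
        rw [pvStreamHead, hs]
        simp
      | false =>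
        rw [pvLoopA_step_off config l ls (pvStreamHead cur) hs (by rw [hdr]; simp)]
        show _ ++ ([l] ++ pvLoopA config ls (pvStreamHead [l])) = _
        rw [pvStreamHead, hs]
        simp
    | false =>
      -- ordinary line: it joins the current chunk
      have hs : (PySem.Str.strip l == "[stream]") = false := by
        cases hs' : (PySem.Str.strip l == "[stream]") with
        | true => rw [pvStream_startswith l hs'] at hdr; exact absurd hdr (by simp)
        | false => rfl
      have hchunk : pvChunk (l :: ls) cur = pvChunk ls (cur ++ [l]) := by
        simp only [pvChunk]; rw [hdr]; simp
      rw [hchunk, ih (cur ++ [l])]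
      cases cur with
      | nil =>
        rw [List.nil_append, pvProcChunk_singleton,
          pvLoopA_step_off config l ls (pvStreamHead []) hs (by rw [hdr]; simp [pvStreamHead])]
        show [l] ++ pvLoopA config ls (pvStreamHead [l]) = _
        rw [pvStreamHead, hs]
        simp [pvProcChunk]
      | cons h t =>
        have hhead : pvStreamHead ((h :: t) ++ [l]) = pvStreamHead (h :: t) := rfl
        rw [hhead]
        cases hsh : (PySem.Str.strip h == "[stream]") with
        | true =>
          have hpc : ∀ u : List String, pvProcChunk config (h :: u)
              = h :: u.map (pvRewriteLine config) := by
            intro u; simp only [pvProcChunk]; rw [hsh]; simp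
          rw [List.cons_append, hpc, hpc, List.map_append, pvStreamHead, hsh,
            pvLoopA_step_stream config l ls hs hdr]
          simp
        | false =>
          have hpc : ∀ u : List String, pvProcChunk config (h :: u) = h :: u := by
            intro u; simp only [pvProcChunk]; rw [hsh]; simp
          rw [List.cons_append, hpc, hpc, pvStreamHead, hsh,
            pvLoopA_step_off config l ls false hs (by rw [hdr]; simp)]
          simp

-- ===== VERDICT (by name: the statement is the Claim_ definition above) =====
theorem modify_config_content_py_spec : Claim_equal_modify_config_content_py := by
  intro content config _
  unfold Spec_modify_config_content_py modify_config_content_py modify_config_content_py_alt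
  rw [pvMain config ((PySem.Str.split? content "\n").getD []) []]
  rfl
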